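-- pv_equiv track=rewrite | github.com/uvm-neurobotics-lab/stitching | src/launch_scaling_experiments.py | get_tensor_shape_sequence
-- ===== SOURCE A (Python) =====
-- def get_tensor_shape_sequence(src_format, dest_format, num_downsamples):
--     # Get the appropriate sequence of tensor shapes for N downsampling steps.
--     in_channels = src_format[1][0]
--     out_channels = dest_format[1][0]
--     in_size = src_format[1][1]
--     out_size = dest_format[1][1]
--     if out_channels >= in_channels:
--         channels = [min(in_channels * (2 ** i), out_channels) for i in range(max(num_downsamples + 1, 2))]
--     else:
--         channels = [max(in_channels // (2 ** i), out_channels) for i in range(max(num_downsamples + 1, 2))]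
--     sizes = [max(in_size // (2 ** i), out_size) for i in range(max(num_downsamples + 1, 2))]
--     # Ensure the final size is `dest_format`, in case the `num_downsamples` wasn't enough to get to the right size.
--     channels[-1] = out_channels
--     sizes[-1] = out_size
--     return channels, sizes
-- ===== SOURCE B (Python) =====
-- def get_tensor_shape_sequence(src_format, dest_format, num_downsamples):
--     # Get the appropriate sequence of tensor shapes for N downsampling steps.
--     # Single loop carrying running (unclamped) channel/size values instead of 2**i closed forms.
--     in_channels = src_format[1][0]
--     out_channels = dest_format[1][0]
--     in_size = src_format[1][1]
--     out_size = dest_format[1][1]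
--     grow = out_channels >= in_channels
--     channels, sizes = [], []
--     ch, sz = in_channels, in_size
--     for _ in range(max(num_downsamples + 1, 2)):
--         channels.append(min(ch, out_channels) if grow else max(ch, out_channels))
--         sizes.append(max(sz, out_size))
--         ch = ch * 2 if grow else ch // 2
--         sz = sz // 2
--     channels[-1] = out_channels
--     sizes[-1] = out_size
--     return channels, sizes
-- ===== Notes on version B (the rewrite author's own statement) =====
-- stated objective: alternative
-- what changed: Replaced the two independent 2**i closed-form list comprehensions by a single loop that carries running (unclamped) channel and size values, doubling or halving them each iteration and appending the clamped values, before the same final-entry override.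
-- outside the precondition, e.g. on get_tensor_shape_sequence(((3,),), ((8, 8), (8, 8)), 2): A raises IndexError, B raises IndexError
import Mathlib
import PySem

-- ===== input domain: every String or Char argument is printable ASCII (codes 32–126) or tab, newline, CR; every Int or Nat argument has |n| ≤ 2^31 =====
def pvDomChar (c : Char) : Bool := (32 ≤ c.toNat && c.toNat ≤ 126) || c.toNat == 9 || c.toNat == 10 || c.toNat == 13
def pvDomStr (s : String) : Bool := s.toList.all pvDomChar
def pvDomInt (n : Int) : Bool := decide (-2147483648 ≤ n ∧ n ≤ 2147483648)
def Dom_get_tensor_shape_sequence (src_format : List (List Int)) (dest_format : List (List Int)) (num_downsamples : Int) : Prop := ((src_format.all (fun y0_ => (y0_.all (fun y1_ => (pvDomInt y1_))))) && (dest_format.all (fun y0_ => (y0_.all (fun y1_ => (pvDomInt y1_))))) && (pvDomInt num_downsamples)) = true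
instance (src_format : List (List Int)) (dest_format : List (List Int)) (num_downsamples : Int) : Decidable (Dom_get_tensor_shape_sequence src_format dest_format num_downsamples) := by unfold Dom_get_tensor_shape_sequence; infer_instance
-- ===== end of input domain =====

-- B replaces the two closed-form `2**i` comprehensions by one loop carrying running
-- (unclamped) channel and size values that are doubled/halved each step (objective: alternative).

-- ===== PORT A =====
def get_tensor_shape_sequence (src_format : List (List Int)) (dest_format : List (List Int)) (num_downsamples : Int) : List Int × List Int :=
  let in_channels := PySem.List.pyGetD (PySem.List.pyGetD src_format 1 []) 0 0
  let out_channels := PySem.List.pyGetD (PySem.List.pyGetD dest_format 1 []) 0 0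
  let in_size := PySem.List.pyGetD (PySem.List.pyGetD src_format 1 []) 1 0
  let out_size := PySem.List.pyGetD (PySem.List.pyGetD dest_format 1 []) 1 0
  let m := max (num_downsamples + 1) 2
  let channels :=
    if out_channels ≥ in_channels then
      (PySem.List.pyRange 0 m 1).map (fun i => min (in_channels * 2 ^ i.toNat) out_channels)
    else
      (PySem.List.pyRange 0 m 1).map (fun i => max (PySem.Int.floordiv in_channels (2 ^ i.toNat)) out_channels)
  let sizes := (PySem.List.pyRange 0 m 1).map (fun i => max (PySem.Int.floordiv in_size (2 ^ i.toNat)) out_size)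
  (PySem.List.pySetD channels (-1) out_channels, PySem.List.pySetD sizes (-1) out_size)

-- ===== PORT B =====
-- B's single loop: runs n times carrying the unclamped running channel/size values.
def pvBLoop (grow : Bool) (oc os : Int) : Nat → Int → Int → List Int → List Int → List Int × List Int
  | 0, _, _, chs, szs => (chs, szs)
  | n+1, ch, sz, chs, szs =>
      pvBLoop grow oc os n
        (if grow then ch * 2 else PySem.Int.floordiv ch 2)
        (PySem.Int.floordiv sz 2)
        (chs ++ [if grow then min ch oc else max ch oc])
        (szs ++ [max sz os])

def get_tensor_shape_sequence_alt (src_format : List (List Int)) (dest_format : List (List Int)) (num_downsamples : Int) : List Int × List Int :=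
  let in_channels := PySem.List.pyGetD (PySem.List.pyGetD src_format 1 []) 0 0
  let out_channels := PySem.List.pyGetD (PySem.List.pyGetD dest_format 1 []) 0 0
  let in_size := PySem.List.pyGetD (PySem.List.pyGetD src_format 1 []) 1 0
  let out_size := PySem.List.pyGetD (PySem.List.pyGetD dest_format 1 []) 1 0
  let grow : Bool := out_channels ≥ in_channels
  let p := pvBLoop grow out_channels out_size (max (num_downsamples + 1) 2).toNat in_channels in_size [] []
  (PySem.List.pySetD p.1 (-1) out_channels, PySem.List.pySetD p.2 (-1) out_size)

-- ===== PRECONDITION & SPEC =====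
-- Pre_ excludes exactly the inputs where Python A raises IndexError: it reads
-- src_format[1][0], src_format[1][1], dest_format[1][0], dest_format[1][1].
def Pre_get_tensor_shape_sequence (src_format : List (List Int)) (dest_format : List (List Int)) (num_downsamples : Int) : Prop :=
  2 ≤ src_format.length ∧ 2 ≤ dest_format.length ∧
  2 ≤ (src_format.getD 1 []).length ∧ 2 ≤ (dest_format.getD 1 []).length
instance (src_format : List (List Int)) (dest_format : List (List Int)) (num_downsamples : Int) : Decidable (Pre_get_tensor_shape_sequence src_format dest_format num_downsamples) := by unfold Pre_get_tensor_shape_sequence; infer_instance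
def pvWitness_get_tensor_shape_sequence : List (List Int) × List (List Int) × Int := ([[3, 32], [3, 32]], [[8, 8], [8, 8]], 2)

def Spec_get_tensor_shape_sequence (src_format : List (List Int)) (dest_format : List (List Int)) (num_downsamples : Int) (out : List Int × List Int) : Prop := out = get_tensor_shape_sequence_alt src_format dest_format num_downsamples
instance (src_format : List (List Int)) (dest_format : List (List Int)) (num_downsamples : Int) (out : List Int × List Int) : Decidable (Spec_get_tensor_shape_sequence src_format dest_format num_downsamples out) := by unfold Spec_get_tensor_shape_sequence; infer_instance

-- ===== CLAIM (what is proved, stated in full; the proofs are below) =====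
def Claim_equal_get_tensor_shape_sequence : Prop := ∀ (src_format : List (List Int)) (dest_format : List (List Int)) (num_downsamples : Int), Dom_get_tensor_shape_sequence src_format dest_format num_downsamples → Pre_get_tensor_shape_sequence src_format dest_format num_downsamples → Spec_get_tensor_shape_sequence src_format dest_format num_downsamples (get_tensor_shape_sequence src_format dest_format num_downsamples)

-- ===== LEMMAS AND PROOFS =====

-- Halving the running value then floor-dividing by 2^k is floor-dividing by 2^(k+1).
theorem pv_ediv_half (a : Int) (k : Nat) : a / 2 / 2 ^ k = a / 2 ^ (k + 1) := by
  rw [Int.ediv_ediv_of_nonneg (by norm_num)]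
  congr 1
  rw [pow_succ]; ring

-- The loop invariant: pvBLoop appends exactly the two closed-form comprehensions.
theorem pvBLoop_spec (grow : Bool) (oc os : Int) (n : Nat) :
    ∀ (ch sz : Int) (chs szs : List Int),
    pvBLoop grow oc os n ch sz chs szs =
      (chs ++ (List.range n).map (fun k =>
          if grow then min (ch * 2 ^ k) oc else max (PySem.Int.floordiv ch (2 ^ k)) oc),
       szs ++ (List.range n).map (fun k => max (PySem.Int.floordiv sz (2 ^ k)) os)) := by
  induction n with
  | zero => intro ch sz chs szs; simp [pvBLoop]
  | succ n ih =>
    intro ch sz chs szs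
    rw [pvBLoop, ih, List.range_succ_eq_map]
    simp only [List.map_cons, List.map_map, List.append_assoc, List.singleton_append, Prod.mk.injEq]
    refine ⟨?_, ?_⟩
    · congr 1
      congr 1
      · cases grow <;> simp
      · apply List.map_congr_left
        intro k _
        cases grow <;>
          simp only [Function.comp_apply, ite_true, ite_false, Bool.false_eq_true,
            Nat.succ_eq_add_one, PySem.Int.floordiv_eq_ediv_of_pos (b := 2) (by norm_num),
            PySem.Int.floordiv_eq_ediv_of_pos (b := (2:Int) ^ k) (by positivity),
            PySem.Int.floordiv_eq_ediv_of_pos (b := (2:Int) ^ (k+1)) (by positivity)]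
        · rw [pv_ediv_half]
        · congr 1; rw [pow_succ]; ring
    · congr 1
      congr 1
      · simp
      · apply List.map_congr_left
        intro k _
        simp only [Function.comp_apply, Nat.succ_eq_add_one,
          PySem.Int.floordiv_eq_ediv_of_pos (b := 2) (by norm_num),
          PySem.Int.floordiv_eq_ediv_of_pos (b := (2:Int) ^ k) (by positivity),
          PySem.Int.floordiv_eq_ediv_of_pos (b := (2:Int) ^ (k+1)) (by positivity)]
        rw [pv_ediv_half]

-- ===== VERDICT (by name: the statement is the Claim_ definition above) =====
theorem get_tensor_shape_sequence_spec : Claim_equal_get_tensor_shape_sequence := by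
  intro src dest nd _ _
  unfold Spec_get_tensor_shape_sequence
  simp only [get_tensor_shape_sequence, get_tensor_shape_sequence_alt, pvBLoop_spec,
    List.nil_append, PySem.List.pyRange_one, List.map_map]
  have hrange : (max (nd + 1) 2 - 0).toNat = (max (nd + 1) 2).toNat := by omega
  rw [hrange]
  by_cases hg : PySem.List.pyGetD (PySem.List.pyGetD dest 1 []) 0 0 ≥ PySem.List.pyGetD (PySem.List.pyGetD src 1 []) 0 0
  · simp only [if_pos hg, decide_eq_true hg, ite_true]
    congr 1 <;> congr 1 <;> apply List.map_congr_left <;> intro k _ <;> simp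
  · simp only [if_neg hg, decide_eq_false hg, Bool.false_eq_true, ite_false]
    congr 1 <;> congr 1 <;> apply List.map_congr_left <;> intro k _ <;> simp
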